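-- pv_equiv track=rewrite | github.com/rosteeslove/bsuir-4th-term-python-stuff | computer_architecture/alu_emulator/floating_point/binstrings.py | first_is_bigger
-- ===== SOURCE A (Python) =====
-- def is_valid(some_string: str):
--     """
--     Return True if the string is binary, False otherwise.
--     """
--     return (set(some_string) == set('01')
--             or set(some_string) == set('0')
--             or set(some_string) == set('1'))
--
-- def _align(a: str, b: str):
--     """
--     Return a and b aligned in length, same by value.
--     """
--     assert is_valid(a) and is_valid(b)
--
--     while len(a) != len(b):
--         if len(a) < len(b):
--             a = '0' + a
--         else:
--             b = '0' + b
--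
--     return a, b
--
-- def first_is_bigger(a: str, b: str):
--     """
--     Return True if a is greater than b,
--     False otherwise.
--     """
--     assert is_valid(a) and is_valid(b)
--
--     a, b = _align(a, b)
--     for a_bit, b_bit in  zip(a, b):
--         if a_bit == '1' and b_bit == '0':
--             return True
--         elif a_bit == '0' and b_bit == '1':
--             return False
--
--     return False
-- ===== SOURCE B (Python) =====
-- def is_valid(some_string: str):
--     """
--     Return True if the string is binary, False otherwise.
--     """
--     return (set(some_string) == set('01')
--             or set(some_string) == set('0')
--             or set(some_string) == set('1'))
--
-- def first_is_bigger(a: str, b: str):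
--     """
--     Return True if a is greater than b,
--     False otherwise.
--     """
--     assert is_valid(a) and is_valid(b)
--     return int(a, 2) > int(b, 2)
-- ===== Notes on version B (the rewrite author's own statement) =====
-- stated objective: simpler
-- what changed: B drops the _align length-padding loop and the bit-by-bit zip scan, and instead converts both strings to integers with int(_, 2) and compares them numerically (keeping the is_valid assert).
import Mathlib
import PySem

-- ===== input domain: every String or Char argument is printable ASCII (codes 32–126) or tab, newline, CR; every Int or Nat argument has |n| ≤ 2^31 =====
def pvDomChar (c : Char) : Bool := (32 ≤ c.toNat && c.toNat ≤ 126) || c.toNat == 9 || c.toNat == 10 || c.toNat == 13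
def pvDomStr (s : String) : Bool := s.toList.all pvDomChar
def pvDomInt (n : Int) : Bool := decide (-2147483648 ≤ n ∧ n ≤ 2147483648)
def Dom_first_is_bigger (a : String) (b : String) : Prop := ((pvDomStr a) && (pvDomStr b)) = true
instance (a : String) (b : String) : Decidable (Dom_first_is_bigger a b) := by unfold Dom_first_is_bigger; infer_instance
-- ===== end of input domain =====

-- B replaces A's _align padding loop + bit-by-bit scan with int(_,2) conversion and a
-- numeric comparison (objective: simpler). Pre_ excludes inputs where A's assert raises.

-- ===== PORT A =====
-- A's `assert is_valid(a) and is_valid(b)` (set(s) == set('01')/set('0')/set('1')) is modelled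
-- by Pre_first_is_bigger below: Python raises AssertionError exactly outside it.
-- the while-loop of _align: prepend '0' to the shorter string until lengths match
def pv_alignLoop (a b : List Char) : List Char × List Char :=
  if a.length ≠ b.length then
    if a.length < b.length then pv_alignLoop ('0' :: a) b
    else pv_alignLoop a ('0' :: b)
  else (a, b)
termination_by (a.length - b.length) + (b.length - a.length)
decreasing_by all_goals (simp only [List.length_cons]; omega)

-- the for-loop over zip(a, b)
def pv_scan : List Char → List Char → Bool
  | a1 :: as, b1 :: bs =>
    if a1 = '1' ∧ b1 = '0' then true
    else if a1 = '0' ∧ b1 = '1' then false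
    else pv_scan as bs
  | _, _ => false

def first_is_bigger (a : String) (b : String) : Bool :=
  let ab := pv_alignLoop a.toList b.toList
  pv_scan ab.1 ab.2

-- ===== PORT B =====
-- int(s, 2): left fold over the digits (exact for strings of '0'/'1' digits, the Pre_ domain)
def pv_int2 (s : String) : Nat :=
  s.toList.foldl (fun acc c => 2 * acc + (if c = '1' then 1 else 0)) 0

def first_is_bigger_alt (a : String) (b : String) : Bool :=
  pv_int2 a > pv_int2 b

-- ===== PRECONDITION & SPEC =====
-- exactly the inputs where A's (and B's) `assert is_valid(a) and is_valid(b)` passes: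
-- both strings nonempty and made only of '0'/'1'
def Pre_first_is_bigger (a : String) (b : String) : Prop :=
  a.toList ≠ [] ∧ b.toList ≠ [] ∧
  (a.toList.all fun c => c = '0' || c = '1') = true ∧
  (b.toList.all fun c => c = '0' || c = '1') = true
instance (a : String) (b : String) : Decidable (Pre_first_is_bigger a b) := by
  unfold Pre_first_is_bigger; infer_instance

def pvWitness_first_is_bigger : String × String := ("1", "0")

def Spec_first_is_bigger (a : String) (b : String) (out : Bool) : Prop := out = first_is_bigger_alt a b
instance (a : String) (b : String) (out : Bool) : Decidable (Spec_first_is_bigger a b out) := by unfold Spec_first_is_bigger; infer_instance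

-- ===== CLAIM (what is proved, stated in full; the proofs are below) =====
def Claim_equal_first_is_bigger : Prop := ∀ (a : String) (b : String), Dom_first_is_bigger a b → Pre_first_is_bigger a b → Spec_first_is_bigger a b (first_is_bigger a b)

-- ===== LEMMAS AND PROOFS =====

-- value of a bit list (= pv_int2 on the underlying list)
def pv_val (l : List Char) : Nat :=
  l.foldl (fun acc c => 2 * acc + (if c = '1' then 1 else 0)) 0

theorem pv_val_aux (l : List Char) (acc : Nat) :
    l.foldl (fun acc c => 2 * acc + (if c = '1' then 1 else 0)) acc
      = acc * 2 ^ l.length + pv_val l := by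
  induction l generalizing acc with
  | nil => simp [pv_val]
  | cons c cs ih =>
    simp only [List.foldl_cons, List.length_cons, pv_val]
    rw [ih, ih (2 * 0 + if c = '1' then 1 else 0)]
    ring

theorem pv_val_cons (c : Char) (l : List Char) :
    pv_val (c :: l) = (if c = '1' then 1 else 0) * 2 ^ l.length + pv_val l := by
  simp only [pv_val, List.foldl_cons]
  rw [pv_val_aux]
  norm_num [pv_val]

theorem pv_val_lt (l : List Char) : pv_val l < 2 ^ l.length := by
  induction l with
  | nil => simp [pv_val]
  | cons c cs ih =>
    rw [pv_val_cons]
    have h2 : (0:Nat) < 2 ^ cs.length := Nat.two_pow_pos _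
    simp only [List.length_cons, pow_succ]
    split_ifs <;> omega

theorem pv_val_zero_cons (l : List Char) : pv_val ('0' :: l) = pv_val l := by
  rw [pv_val_cons]; simp

-- the zip scan on equal-length bit lists decides the numeric comparison
theorem pv_scan_eq (a b : List Char) (hlen : a.length = b.length)
    (ha : ∀ c ∈ a, c = '0' ∨ c = '1') (hb : ∀ c ∈ b, c = '0' ∨ c = '1') :
    pv_scan a b = decide (pv_val a > pv_val b) := by
  induction a generalizing b with
  | nil =>
    cases b with
    | nil => simp [pv_scan, pv_val]
    | cons y ys => simp at hlen
  | cons x xs ih =>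
    cases b with
    | cons y ys =>
      have hx : x = '0' ∨ x = '1' := ha x (by simp)
      have hy : y = '0' ∨ y = '1' := hb y (by simp)
      have hlen' : xs.length = ys.length := by simpa using hlen
      have hva := pv_val_lt xs
      have hvb := pv_val_lt ys
      have ihxy := ih ys hlen' (fun c hc => ha c (by simp [hc]))
        (fun c hc => hb c (by simp [hc]))
      have hpow : (2:Nat) ^ xs.length = 2 ^ ys.length := by rw [hlen']
      rcases hx with hx | hx <;> rcases hy with hy | hy <;>
        subst hx <;> subst hy <;>
        simp only [pv_scan, pv_val_cons, ihxy] <;>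
        simp <;> omega
    | nil => simp at hlen

-- pv_alignLoop: lengths become equal, values are preserved, validity is preserved
theorem pv_alignLoop_spec (a b : List Char) :
    (pv_alignLoop a b).1.length = (pv_alignLoop a b).2.length ∧
    pv_val (pv_alignLoop a b).1 = pv_val a ∧
    pv_val (pv_alignLoop a b).2 = pv_val b ∧
    (∀ c ∈ (pv_alignLoop a b).1, c = '0' ∨ c ∈ a) ∧
    (∀ c ∈ (pv_alignLoop a b).2, c = '0' ∨ c ∈ b) := by
  fun_induction pv_alignLoop a b with
  | case1 a b hne hlt ih =>
    refine ⟨ih.1, ?_, ih.2.2.1, ?_, ih.2.2.2.2⟩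
    · rw [ih.2.1, pv_val_zero_cons]
    · intro c hc
      rcases ih.2.2.2.1 c hc with h | h
      · exact Or.inl h
      · rcases List.mem_cons.mp h with h | h
        · exact Or.inl h
        · exact Or.inr h
  | case2 a b hne hge ih =>
    refine ⟨ih.1, ih.2.1, ?_, ih.2.2.2.1, ?_⟩
    · rw [ih.2.2.1, pv_val_zero_cons]
    · intro c hc
      rcases ih.2.2.2.2 c hc with h | h
      · exact Or.inl h
      · rcases List.mem_cons.mp h with h | h
        · exact Or.inl h
        · exact Or.inr h
  | case3 a b h =>
    refine ⟨by show a.length = b.length; omega, rfl, rfl,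
      fun c hc => Or.inr hc, fun c hc => Or.inr hc⟩

-- ===== VERDICT (by name: the statement is the Claim_ definition above) =====
theorem first_is_bigger_spec : Claim_equal_first_is_bigger := by
  intro a b _hdom hpre
  obtain ⟨_, _, ha, hb⟩ := hpre
  replace ha : ∀ c ∈ a.toList, c = '0' ∨ c = '1' := by simpa using ha
  replace hb : ∀ c ∈ b.toList, c = '0' ∨ c = '1' := by simpa using hb
  unfold Spec_first_is_bigger first_is_bigger first_is_bigger_alt
  obtain ⟨hlen, hva, hvb, hmema, hmemb⟩ := pv_alignLoop_spec a.toList b.toList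
  have ha' : ∀ c ∈ (pv_alignLoop a.toList b.toList).1, c = '0' ∨ c = '1' := by
    intro c hc
    rcases hmema c hc with h | h
    · exact Or.inl h
    · exact ha c h
  have hb' : ∀ c ∈ (pv_alignLoop a.toList b.toList).2, c = '0' ∨ c = '1' := by
    intro c hc
    rcases hmemb c hc with h | h
    · exact Or.inl h
    · exact hb c h
  rw [pv_scan_eq _ _ hlen ha' hb', hva, hvb]
  simp [pv_int2, pv_val]
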